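-- pv_equiv track=rewrite | github.com/fzamore/advent-of-code | 2019/day16.py | singleFFT
-- ===== SOURCE A (Python) =====
-- def singleFFT(signal: list[int], patterns: list[tuple[int, int]]) -> int:
--   result = 0
--   i = 0
--   pi = 0
--   first = True
--   while i < len(signal):
--     length, value = patterns[pi]
--     assert length > 0, 'bad pattern length'
--     assert value in [0, 1, -1], 'bad pattern value'
--
--     if first:
--       # Skip the first pattern value exactly once.
--       length -= 1
--       first = False
--
--     if value != 0 and length != 0:
--       result += value * sum(signal[i:i + length])
--
--     i += length
--     pi = (pi + 1) % len(patterns)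
--
--   return abs(result) % 10
-- ===== SOURCE B (Python) =====
-- def singleFFT(sig: list[int], pats: list[tuple[int, int]]) -> int:
--   # Build the full coefficient table by run-length expansion, then one dot product.
--   n = len(sig)
--   coeffs = []
--   k = 0
--   first = True
--   while len(coeffs) < n:
--     length, value = pats[k % len(pats)]
--     assert length > 0, 'bad pattern length'
--     assert value in [0, 1, -1], 'bad pattern value'
--     coeffs += [value] * (length - 1 if first else length)
--     first = False
--     k += 1
--   return abs(sum(s * c for s, c in zip(sig, coeffs))) % 10
-- ===== Notes on version B (the rewrite author's own statement) =====
-- stated objective: alternative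
-- what changed: A accumulates the answer segment by segment with guarded slice sums inside the cursor loop; B first materialises the full coefficient table by run-length expansion of the cycled patterns (honoring the skip-one-first quirk) and then computes a single element-wise dot product with the signal.
import Mathlib
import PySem

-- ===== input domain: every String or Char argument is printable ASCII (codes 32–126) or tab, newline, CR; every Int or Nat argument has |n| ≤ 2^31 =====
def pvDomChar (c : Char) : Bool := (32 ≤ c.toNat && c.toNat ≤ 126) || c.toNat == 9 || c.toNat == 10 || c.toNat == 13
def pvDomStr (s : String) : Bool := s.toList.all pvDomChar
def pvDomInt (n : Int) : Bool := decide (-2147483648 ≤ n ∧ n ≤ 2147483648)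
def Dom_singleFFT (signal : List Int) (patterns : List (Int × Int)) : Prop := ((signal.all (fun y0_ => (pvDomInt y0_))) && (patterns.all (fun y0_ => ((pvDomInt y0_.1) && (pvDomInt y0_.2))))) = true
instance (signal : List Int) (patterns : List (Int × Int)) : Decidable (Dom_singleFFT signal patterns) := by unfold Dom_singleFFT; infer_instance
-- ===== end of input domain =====

-- B replaces A's cursor loop of guarded slice sums by materialising the full coefficient
-- table (run-length expansion of the cycled patterns) followed by one dot product
-- (objective: alternative decomposition, same cost).

-- ===== PORT A =====
-- while loop of A as fuel recursion over state (result, i, pi, first); fuel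
-- signal.length + 2 bounds the iteration count (each segment but the first consumes ≥ 1
-- signal element under the asserts). Assert failure / IndexError cases return the
-- accumulator; they are excluded by Pre_.
def loopA (signal : List Int) (patterns : List (Int × Int)) : Nat → Int → Int → Int → Bool → Int
  | 0, result, _, _, _ => result
  | fuel+1, result, i, pi, first =>
    if i < (signal.length : Int) then
      match PySem.List.pyGet? patterns pi with
      | none => result
      | some (len0, value) =>
        if 0 < len0 ∧ (value = 0 ∨ value = 1 ∨ value = -1) then
          let len1 := if first then len0 - 1 else len0
          let result1 := if value ≠ 0 ∧ len1 ≠ 0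
            then result + value * (PySem.List.slice signal (some i) (some (i + len1))).sum
            else result
          loopA signal patterns fuel result1 (i + len1) (PySem.Int.mod (pi + 1) (patterns.length : Int)) false
        else result
    else result

def singleFFT (signal : List Int) (patterns : List (Int × Int)) : Int :=
  PySem.Int.mod |loopA signal patterns (signal.length + 2) 0 0 0 true| 10

-- ===== PORT B =====
-- B's while loop building the coefficient table; same fuel bound as A's loop.
def buildCoeffs (n : Nat) (patterns : List (Int × Int)) : Nat → Nat → Bool → List Int → List Int
  | 0, _, _, acc => acc
  | fuel+1, k, first, acc =>
    if acc.length < n then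
      match patterns[k % patterns.length]? with
      | none => acc
      | some (len0, value) =>
        if 0 < len0 ∧ (value = 0 ∨ value = 1 ∨ value = -1) then
          buildCoeffs n patterns fuel (k+1) false
            (acc ++ List.replicate (if first then len0 - 1 else len0).toNat value)
        else acc
    else acc

def singleFFT_alt (signal : List Int) (patterns : List (Int × Int)) : Int :=
  let coeffs := buildCoeffs signal.length patterns (signal.length + 2) 0 true []
  PySem.Int.mod |(List.zipWith (· * ·) signal coeffs).sum| 10

-- ===== PRECONDITION & SPEC =====
-- Pre_ holds exactly on the inputs where A returns normally; it excludes the inputs on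
-- which A raises: a nonempty signal with empty patterns (IndexError), and an invalid
-- pattern entry (length ≤ 0 or value outside {0,1,-1}) reached before the signal is
-- exhausted (AssertionError).
def Pre_singleFFT (signal : List Int) (patterns : List (Int × Int)) : Prop :=
  signal = [] ∨ (patterns ≠ [] ∧
    ((∀ p ∈ patterns, 0 < p.1 ∧ (p.2 = 0 ∨ p.2 = 1 ∨ p.2 = -1)) ∨
     (∃ j ∈ List.range (patterns.length + 1), 0 < j ∧
        (∀ p ∈ patterns.take j, 0 < p.1 ∧ (p.2 = 0 ∨ p.2 = 1 ∨ p.2 = -1)) ∧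
        (signal.length : Int) + 1 ≤ ((patterns.take j).map Prod.fst).sum)))
instance (signal : List Int) (patterns : List (Int × Int)) : Decidable (Pre_singleFFT signal patterns) := by
  unfold Pre_singleFFT; infer_instance

def pvWitness_singleFFT : List Int × (List (Int × Int)) := ([1, 2, 3, 4], [(2, 1), (1, 0), (3, -1)])

def Spec_singleFFT (signal : List Int) (patterns : List (Int × Int)) (out : Int) : Prop := out = singleFFT_alt signal patterns
instance (signal : List Int) (patterns : List (Int × Int)) (out : Int) : Decidable (Spec_singleFFT signal patterns out) := by unfold Spec_singleFFT; infer_instance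

-- ===== CLAIM (what is proved, stated in full; the proofs are below) =====
def Claim_equal_singleFFT : Prop := ∀ (signal : List Int) (patterns : List (Int × Int)), Dom_singleFFT signal patterns → Pre_singleFFT signal patterns → Spec_singleFFT signal patterns (singleFFT signal patterns)

-- ===== LEMMAS AND PROOFS =====

def dotp (s c : List Int) : Int := (List.zipWith (· * ·) s c).sum

theorem zip_rep_sum : ∀ (s : List Int) (m : Nat) (v : Int),
    (List.zipWith (· * ·) s (List.replicate m v)).sum = v * (s.take m).sum := by
  intro s
  induction s with
  | nil => intro m v; simp
  | cons a s ih =>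
    intro m v
    cases m with
    | zero => simp
    | succ m => simp [List.replicate, ih m v]; ring

theorem dotp_append_replicate : ∀ (s acc : List Int) (m : Nat) (v : Int),
    acc.length ≤ s.length →
    dotp s (acc ++ List.replicate m v) = dotp s acc + v * ((s.drop acc.length).take m).sum := by
  intro s acc
  induction acc generalizing s with
  | nil => intro m v _; simp [dotp, zip_rep_sum]
  | cons a acc ih =>
    intro m v h
    cases s with
    | nil => simp at h
    | cons b s =>
      simp only [List.length_cons, Nat.succ_le_succ_iff] at h
      simp only [List.cons_append, dotp, List.zipWith, List.sum_cons]
      have := ih s m v h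
      simp only [dotp] at this
      rw [this]
      simp only [List.length_cons, List.drop_succ_cons]
      ring

-- Both loops run in lockstep, one pattern segment per fuel unit; the accumulated result
-- of A's loop is the dot product of the signal with B's coefficient table built so far.
theorem loop_eq (signal : List Int) (patterns : List (Int × Int)) :
    ∀ (fuel k : Nat) (first : Bool) (acc : List Int),
      loopA signal patterns fuel (dotp signal acc) (acc.length : Int)
        (((k % patterns.length : Nat) : Int)) first
        = dotp signal (buildCoeffs signal.length patterns fuel k first acc) := by
  intro fuel
  induction fuel with
  | zero => intro k first acc; simp [loopA, buildCoeffs]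
  | succ fuel ih =>
    intro k first acc
    by_cases hlt : acc.length < signal.length
    · have hlt' : ((acc.length : Int) < (signal.length : Int)) := by exact_mod_cast hlt
      by_cases hpz : patterns = []
      · subst hpz
        rw [loopA, buildCoeffs, if_pos hlt, if_pos hlt']
        simp [PySem.List.pyGet?]
      · have hlen : 0 < patterns.length := List.length_pos_of_ne_nil hpz
        have hidx : k % patterns.length < patterns.length := Nat.mod_lt _ hlen
        rcases hp : patterns[k % patterns.length] with ⟨len0, value⟩
        have hget : PySem.List.pyGet? patterns ((k % patterns.length : Nat) : Int)
            = some (len0, value) := by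
          rw [PySem.List.pyGet?_natCast, List.getElem?_eq_getElem hidx, hp]
        have hgetB : patterns[k % patterns.length]? = some (len0, value) := by
          rw [List.getElem?_eq_getElem hidx, hp]
        rw [loopA, buildCoeffs, if_pos hlt, if_pos hlt', hget, hgetB]
        by_cases hguard : (0 : Int) < len0 ∧ (value = 0 ∨ value = 1 ∨ value = -1)
        · have hnn : (0 : Int) ≤ (if first then len0 - 1 else len0) := by
            rcases hguard with ⟨hl0, _⟩; split <;> omega
          have hres : ∀ L : Int, 0 ≤ L →
              (if value ≠ 0 ∧ L ≠ 0
                then dotp signal acc + value * (PySem.List.slice signal (some ((acc.length : Int)))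
                  (some ((acc.length : Int) + L))).sum
                else dotp signal acc)
              = dotp signal (acc ++ List.replicate L.toNat value) := by
            intro L hL
            have hmL : ((L.toNat : Nat) : Int) = L := Int.toNat_of_nonneg hL
            have hslice : PySem.List.slice signal (some ((acc.length : Int)))
                  (some ((acc.length : Int) + L))
                = (signal.drop acc.length).take L.toNat := by
              rw [← hmL]; exact PySem.List.slice_natCast_add signal acc.length _
            rw [dotp_append_replicate signal acc _ value (le_of_lt hlt), hslice]
            split_ifs with hng
            · rfl
            · rcases not_and_or.mp hng with hv | hl
              · rw [not_not] at hv; rw [hv]; simp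
              · rw [not_not] at hl; rw [hl]; simp
          have hilen : ∀ L : Int, 0 ≤ L →
              (((acc ++ List.replicate L.toNat value).length : Nat) : Int) = (acc.length : Int) + L := by
            intro L hL
            rw [List.length_append, List.length_replicate, Nat.cast_add, Int.toNat_of_nonneg hL]
          have hpi : PySem.Int.mod (((k % patterns.length : Nat) : Int) + 1) ((patterns.length : Nat) : Int)
              = (((k + 1) % patterns.length : Nat) : Int) := by
            rw [PySem.Int.mod_eq_emod_of_pos (by exact_mod_cast hlen)]
            have h2 : (k % patterns.length + 1) % patterns.length = (k + 1) % patterns.length :=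
              Nat.mod_add_mod k patterns.length 1
            exact_mod_cast h2
          simp only [if_pos hguard]
          rw [hres _ hnn, hpi, ← hilen _ hnn]
          exact ih (k + 1) false _
        · simp only [if_neg hguard]
    · have hlt' : ¬ ((acc.length : Int) < (signal.length : Int)) := by exact_mod_cast hlt
      rw [loopA, buildCoeffs, if_neg hlt, if_neg hlt']

-- ===== VERDICT (by name: the statement is the Claim_ definition above) =====
theorem singleFFT_spec : Claim_equal_singleFFT := by
  intro signal patterns _ _
  unfold Spec_singleFFT singleFFT singleFFT_alt
  have h := loop_eq signal patterns (signal.length + 2) 0 true []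
  simp only [List.length_nil, Nat.zero_mod, Nat.cast_zero, dotp, List.zipWith_nil_right,
    List.sum_nil] at h
  rw [h]
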